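-- pv_equiv track=rewrite | github.com/anithjoy/leetCode | 2011leetCode.py | finalValueAfterOperations
-- ===== SOURCE A (Python) =====
-- def finalValueAfterOperations(operations):
--     """
--     :type operations: List[str]
--     :rtype: int
--     """
--
--     res = 0
--
--     if not operations:
--         return res
--
--     for i in operations:
--         if (i == "X++" or i == "++X") :
--             res += 1
--         elif (i == "X--" or i == "--X") :
--             res -= 1
--         else :
--             continue
--
--     return res
--
-- operations = ["++X","++X","X++"]
-- ===== SOURCE B (Python) =====
-- def finalValueAfterOperations(operations):
--     """
--     :type operations: List[str]
--     :rtype: int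
--     """
--     return (operations.count("X++") + operations.count("++X")
--             - operations.count("X--") - operations.count("--X"))
-- ===== Notes on version B (the rewrite author's own statement) =====
-- stated objective: idiomatic
-- what changed: Replaces the per-element if/elif accumulation loop with a closed-form combination of four list.count tallies of the exact recognized tokens.
import Mathlib
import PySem

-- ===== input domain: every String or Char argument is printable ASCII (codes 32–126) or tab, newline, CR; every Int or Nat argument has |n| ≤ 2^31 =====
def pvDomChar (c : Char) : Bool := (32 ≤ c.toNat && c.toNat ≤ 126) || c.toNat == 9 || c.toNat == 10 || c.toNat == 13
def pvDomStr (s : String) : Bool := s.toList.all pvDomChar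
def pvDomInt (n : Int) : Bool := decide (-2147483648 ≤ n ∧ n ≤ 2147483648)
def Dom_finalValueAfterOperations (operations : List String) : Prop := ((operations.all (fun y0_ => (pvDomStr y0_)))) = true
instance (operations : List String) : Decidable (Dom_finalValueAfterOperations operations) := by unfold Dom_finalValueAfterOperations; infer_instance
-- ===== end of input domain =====

-- B computes the same value by a closed form over four exact-token counts instead of A's branching loop.

-- ===== PORT A =====
def finalValueAfterOperations (operations : List String) : Int :=
  if operations = [] then 0
  else
    operations.foldl (fun res i =>
      if i = "X++" ∨ i = "++X" then res + 1
      else if i = "X--" ∨ i = "--X" then res - 1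
      else res) 0

-- ===== PORT B =====
def finalValueAfterOperations_alt (operations : List String) : Int :=
  (PySem.List.count operations "X++" : Int) + (PySem.List.count operations "++X" : Int)
    - (PySem.List.count operations "X--" : Int) - (PySem.List.count operations "--X" : Int)

-- ===== PRECONDITION & SPEC =====
def Spec_finalValueAfterOperations (operations : List String) (out : Int) : Prop := out = finalValueAfterOperations_alt operations
instance (operations : List String) (out : Int) : Decidable (Spec_finalValueAfterOperations operations out) := by unfold Spec_finalValueAfterOperations; infer_instance

-- ===== CLAIM (what is proved, stated in full; the proofs are below) =====
def Claim_equal_finalValueAfterOperations : Prop := ∀ (operations : List String), Dom_finalValueAfterOperations operations → Spec_finalValueAfterOperations operations (finalValueAfterOperations operations)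

-- ===== LEMMAS AND PROOFS =====

theorem fvao_fold_shift (operations : List String) (r : Int) :
    operations.foldl (fun res i =>
      if i = "X++" ∨ i = "++X" then res + 1
      else if i = "X--" ∨ i = "--X" then res - 1
      else res) r = r + finalValueAfterOperations_alt operations := by
  induction operations generalizing r with
  | nil => simp [finalValueAfterOperations_alt, PySem.List.count]
  | cons h t ih =>
    simp only [List.foldl_cons, ih, finalValueAfterOperations_alt, PySem.List.count, List.count_cons]
    by_cases e1 : h = "X++" <;> by_cases e2 : h = "++X" <;>
      by_cases e3 : h = "X--" <;> by_cases e4 : h = "--X" <;>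
      simp_all <;> push_cast <;> ring

-- ===== VERDICT (by name: the statement is the Claim_ definition above) =====
theorem finalValueAfterOperations_spec : Claim_equal_finalValueAfterOperations := by
  intro operations _
  unfold Spec_finalValueAfterOperations finalValueAfterOperations
  split_ifs with h
  · subst h; simp [finalValueAfterOperations_alt, PySem.List.count]
  · simpa using fvao_fold_shift operations 0
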